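-- pv_equiv track=rewrite | github.com/mrn0b0t/TaskHound | taskhound/engine.py | _sort_tasks_by_priority
-- ===== SOURCE A (Python) =====
-- from typing import Dict, List, Optional
--
-- def _sort_tasks_by_priority(lines: List[str]) -> List[str]:
--     """Sort task blocks by priority: TIER-0 > PRIV > TASK"""
--     if not lines:
--         return lines
--
--     # Group lines into task blocks (each block starts with a header like [TIER-0])
--     blocks = []
--     current_block = []
--
--     for line in lines:
--         if line.startswith('\n[') and current_block:
--             # Start of new block, save the previous one
--             blocks.append(current_block)
--             current_block = [line]
--         else:
--             current_block.append(line)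
--
--     # Don't forget the last block
--     if current_block:
--         blocks.append(current_block)
--
--     # Define priority order
--     def get_block_priority(block):
--         if not block:
--             return 3  # Unknown/default priority
--
--         first_line = block[0]
--         if '[TIER-0]' in first_line:
--             return 0
--         elif '[PRIV]' in first_line:
--             return 1
--         elif '[TASK]' in first_line:
--             return 2
--         else:
--             return 3
--
--     # Sort blocks by priority
--     sorted_blocks = sorted(blocks, key=get_block_priority)
--
--     # Flatten back to a single list
--     result = []
--     for block in sorted_blocks:
--         result.extend(block)
--
--     return result
-- ===== SOURCE B (Python) =====
-- def _prio(line):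
--     if '[TIER-0]' in line:
--         return 0
--     if '[PRIV]' in line:
--         return 1
--     if '[TASK]' in line:
--         return 2
--     return 3
--
-- def _sort_tasks_by_priority(lines):
--     """Group lines into 4 ordered priority buckets in one pass; no explicit sort."""
--     if not lines:
--         return lines
--     buckets = ([], [], [], [])
--     cur = _prio(lines[0])
--     buckets[cur].append(lines[0])
--     for line in lines[1:]:
--         if line.startswith('\n['):
--             cur = _prio(line)
--         buckets[cur].append(line)
--     return buckets[0] + buckets[1] + buckets[2] + buckets[3]
-- ===== Notes on version B (the rewrite author's own statement) =====
-- stated objective: alternative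
-- what changed: Replaces group-into-blocks + stable sort + flatten with a single pass that drops each line into one of four ordered priority buckets (a stable bucket/counting sort), concatenated at the end.
import Mathlib
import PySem

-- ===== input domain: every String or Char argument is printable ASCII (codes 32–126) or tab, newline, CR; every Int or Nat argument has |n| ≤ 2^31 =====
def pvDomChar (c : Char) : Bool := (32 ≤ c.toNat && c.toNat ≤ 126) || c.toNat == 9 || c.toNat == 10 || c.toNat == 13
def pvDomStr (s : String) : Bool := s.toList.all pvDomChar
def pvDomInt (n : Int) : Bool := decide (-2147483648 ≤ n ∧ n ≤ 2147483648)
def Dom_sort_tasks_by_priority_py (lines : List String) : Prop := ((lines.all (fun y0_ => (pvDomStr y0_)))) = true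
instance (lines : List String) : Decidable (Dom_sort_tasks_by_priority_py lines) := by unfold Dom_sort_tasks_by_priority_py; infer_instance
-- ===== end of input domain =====

-- B replaces A's group-blocks/stable-sort/flatten pipeline with a single pass into four
-- ordered priority buckets (a stable bucket sort); same return value by a different algorithm.

-- ===== PORT A =====
-- get_block_priority: A's inner helper, literal.
def pvGetBlockPriority (block : List String) : Nat :=
  match block with
  | [] => 3
  | first_line :: _ =>
    if PySem.Str.isIn "[TIER-0]" first_line then 0
    else if PySem.Str.isIn "[PRIV]" first_line then 1
    else if PySem.Str.isIn "[TASK]" first_line then 2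
    else 3

-- body of A's grouping loop (one iteration)
def pvStepA (st : List (List String) × List String) (line : String) :
    List (List String) × List String :=
  if PySem.Str.startswith line "\n[" && !st.2.isEmpty then
    (st.1 ++ [st.2], [line])
  else
    (st.1, st.2 ++ [line])

def sort_tasks_by_priority_py (lines : List String) : List String :=
  if lines.isEmpty then lines else
  let st := lines.foldl pvStepA ([], [])
  let blocks := if st.2.isEmpty then st.1 else st.1 ++ [st.2]
  let sorted_blocks := PySem.List.sorted blocks pvGetBlockPriority false
  sorted_blocks.foldl (fun result block => result ++ block) []

-- ===== PORT B =====
-- _prio from Source B, literal.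
def pvLinePriority (line : String) : Nat :=
  if PySem.Str.isIn "[TIER-0]" line then 0
  else if PySem.Str.isIn "[PRIV]" line then 1
  else if PySem.Str.isIn "[TASK]" line then 2
  else 3

-- buckets[i].append(line) on the 4-tuple of buckets
def pvAddTo (b : List String × List String × List String × List String) (i : Nat)
    (line : String) : List String × List String × List String × List String :=
  match i with
  | 0 => (b.1 ++ [line], b.2.1, b.2.2.1, b.2.2.2)
  | 1 => (b.1, b.2.1 ++ [line], b.2.2.1, b.2.2.2)
  | 2 => (b.1, b.2.1, b.2.2.1 ++ [line], b.2.2.2)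
  | _ => (b.1, b.2.1, b.2.2.1, b.2.2.2 ++ [line])

-- body of B's single loop (one iteration): state = (buckets, cur)
def pvStepB (st : (List String × List String × List String × List String) × Nat)
    (line : String) : (List String × List String × List String × List String) × Nat :=
  let cur := if PySem.Str.startswith line "\n[" then pvLinePriority line else st.2
  (pvAddTo st.1 cur line, cur)

def sort_tasks_by_priority_py_alt (lines : List String) : List String :=
  match lines with
  | [] => []
  | first :: rest =>
    let c0 := pvLinePriority first
    let st := rest.foldl pvStepB (pvAddTo ([], [], [], []) c0 first, c0)
    st.1.1 ++ st.1.2.1 ++ st.1.2.2.1 ++ st.1.2.2.2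

-- ===== PRECONDITION & SPEC =====
def Spec_sort_tasks_by_priority_py (lines : List String) (out : List String) : Prop := out = sort_tasks_by_priority_py_alt lines
instance (lines : List String) (out : List String) : Decidable (Spec_sort_tasks_by_priority_py lines out) := by unfold Spec_sort_tasks_by_priority_py; infer_instance

-- ===== CLAIM (what is proved, stated in full; the proofs are below) =====
def Claim_equal_sort_tasks_by_priority_py : Prop := ∀ (lines : List String), Dom_sort_tasks_by_priority_py lines → Spec_sort_tasks_by_priority_py lines (sort_tasks_by_priority_py lines)

-- ===== LEMMAS AND PROOFS =====

-- blocks of priority p, in order; and their flattening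
def pvG (p : Nat) (bs : List (List String)) : List (List String) :=
  bs.filter (fun y => pvGetBlockPriority y == p)

def pvF (p : Nat) (bs : List (List String)) : List String := (pvG p bs).flatten

lemma pvPrio_cases (b : List String) :
    pvGetBlockPriority b = 0 ∨ pvGetBlockPriority b = 1 ∨
    pvGetBlockPriority b = 2 ∨ pvGetBlockPriority b = 3 := by
  rcases b with _ | ⟨l, t⟩
  · simp [pvGetBlockPriority]
  · simp only [pvGetBlockPriority]
    split_ifs <;> simp

lemma pvPrioA_cons (l : String) (t : List String) :
    pvGetBlockPriority (l :: t) = pvLinePriority l := rfl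

lemma pvInsertBy_skip (x : List String) (as bs : List (List String))
    (h : ∀ a ∈ as, ¬ pvGetBlockPriority x < pvGetBlockPriority a) :
    PySem.List.insertBy (fun a b => decide (pvGetBlockPriority a < pvGetBlockPriority b)) x (as ++ bs)
      = as ++ PySem.List.insertBy (fun a b => decide (pvGetBlockPriority a < pvGetBlockPriority b)) x bs := by
  induction as with
  | nil => simp
  | cons a as ih =>
    have ha : ¬ pvGetBlockPriority x < pvGetBlockPriority a := h a (by simp)
    simp [PySem.List.insertBy, ha, ih (fun a' h' => h a' (by simp [h']))]

lemma pvInsertBy_front (x : List String) (bs : List (List String))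
    (h : ∀ b ∈ bs, pvGetBlockPriority x < pvGetBlockPriority b) :
    PySem.List.insertBy (fun a b => decide (pvGetBlockPriority a < pvGetBlockPriority b)) x bs
      = x :: bs := by
  rcases bs with _ | ⟨b, bs⟩
  · simp [PySem.List.insertBy]
  · simp [PySem.List.insertBy, h b (by simp)]

lemma pvFoldl_ins_buckets (bs : List (List String)) :
    ∀ (f0 f1 f2 f3 : List (List String))
      (h0 : ∀ y ∈ f0, pvGetBlockPriority y = 0) (h1 : ∀ y ∈ f1, pvGetBlockPriority y = 1)
      (h2 : ∀ y ∈ f2, pvGetBlockPriority y = 2) (h3 : ∀ y ∈ f3, pvGetBlockPriority y = 3),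
    List.foldl (fun acc x =>
        PySem.List.insertBy (fun a b => decide (pvGetBlockPriority a < pvGetBlockPriority b)) x acc)
      (f0 ++ (f1 ++ (f2 ++ f3))) bs
      = (f0 ++ pvG 0 bs) ++ ((f1 ++ pvG 1 bs) ++ ((f2 ++ pvG 2 bs) ++ (f3 ++ pvG 3 bs))) := by
  induction bs with
  | nil => intro f0 f1 f2 f3 _ _ _ _; simp [pvG]
  | cons x bs ih =>
    intro f0 f1 f2 f3 h0 h1 h2 h3
    rcases pvPrio_cases x with hx | hx | hx | hx
    · have hstep :
          PySem.List.insertBy (fun a b => decide (pvGetBlockPriority a < pvGetBlockPriority b)) x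
            (f0 ++ (f1 ++ (f2 ++ f3))) = (f0 ++ [x]) ++ (f1 ++ (f2 ++ f3)) := by
        rw [pvInsertBy_skip x f0 _ (by intro a ha; rw [hx, h0 a ha]; omega),
            pvInsertBy_front x _ (by
              intro b hb; rw [hx]
              rcases (by simpa using hb : b ∈ f1 ∨ b ∈ f2 ∨ b ∈ f3) with h | h | h
              · rw [h1 b h]; omega
              · rw [h2 b h]; omega
              · rw [h3 b h]; omega)]
        simp
      rw [List.foldl_cons, hstep,
          ih (f0 ++ [x]) f1 f2 f3 (by intro y hy; rcases (by simpa using hy : y ∈ f0 ∨ y = x) with h | h; exacts [h0 y h, by simp [h, hx]]) h1 h2 h3]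
      simp [pvG, hx]
    · have hstep :
          PySem.List.insertBy (fun a b => decide (pvGetBlockPriority a < pvGetBlockPriority b)) x
            (f0 ++ (f1 ++ (f2 ++ f3))) = f0 ++ ((f1 ++ [x]) ++ (f2 ++ f3)) := by
        rw [show f0 ++ (f1 ++ (f2 ++ f3)) = (f0 ++ f1) ++ (f2 ++ f3) by simp,
            pvInsertBy_skip x (f0 ++ f1) _ (by
              intro a ha; rw [hx]
              rcases (by simpa using ha : a ∈ f0 ∨ a ∈ f1) with h | h
              · rw [h0 a h]; omega
              · rw [h1 a h]; omega),
            pvInsertBy_front x _ (by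
              intro b hb; rw [hx]
              rcases (by simpa using hb : b ∈ f2 ∨ b ∈ f3) with h | h
              · rw [h2 b h]; omega
              · rw [h3 b h]; omega)]
        simp
      rw [List.foldl_cons, hstep,
          ih f0 (f1 ++ [x]) f2 f3 h0 (by intro y hy; rcases (by simpa using hy : y ∈ f1 ∨ y = x) with h | h; exacts [h1 y h, by simp [h, hx]]) h2 h3]
      simp [pvG, hx]
    · have hstep :
          PySem.List.insertBy (fun a b => decide (pvGetBlockPriority a < pvGetBlockPriority b)) x
            (f0 ++ (f1 ++ (f2 ++ f3))) = f0 ++ (f1 ++ ((f2 ++ [x]) ++ f3)) := by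
        rw [show f0 ++ (f1 ++ (f2 ++ f3)) = (f0 ++ (f1 ++ f2)) ++ f3 by simp,
            pvInsertBy_skip x (f0 ++ (f1 ++ f2)) _ (by
              intro a ha; rw [hx]
              rcases (by simpa using ha : a ∈ f0 ∨ a ∈ f1 ∨ a ∈ f2) with h | h | h
              · rw [h0 a h]; omega
              · rw [h1 a h]; omega
              · rw [h2 a h]; omega),
            pvInsertBy_front x f3 (by intro b hb; rw [hx, h3 b hb]; omega)]
        simp
      rw [List.foldl_cons, hstep,
          ih f0 f1 (f2 ++ [x]) f3 h0 h1 (by intro y hy; rcases (by simpa using hy : y ∈ f2 ∨ y = x) with h | h; exacts [h2 y h, by simp [h, hx]]) h3]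
      simp [pvG, hx]
    · have hstep :
          PySem.List.insertBy (fun a b => decide (pvGetBlockPriority a < pvGetBlockPriority b)) x
            (f0 ++ (f1 ++ (f2 ++ f3))) = f0 ++ (f1 ++ (f2 ++ (f3 ++ [x]))) := by
        rw [show f0 ++ (f1 ++ (f2 ++ f3)) = (f0 ++ (f1 ++ (f2 ++ f3))) ++ [] by simp,
            pvInsertBy_skip x (f0 ++ (f1 ++ (f2 ++ f3))) [] (by
              intro a ha; rw [hx]
              rcases (by simpa using ha : a ∈ f0 ∨ a ∈ f1 ∨ a ∈ f2 ∨ a ∈ f3) with h | h | h | h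
              · rw [h0 a h]; omega
              · rw [h1 a h]; omega
              · rw [h2 a h]; omega
              · rw [h3 a h]; omega)]
        simp [PySem.List.insertBy]
      rw [List.foldl_cons, hstep,
          ih f0 f1 f2 (f3 ++ [x]) h0 h1 h2 (by intro y hy; rcases (by simpa using hy : y ∈ f3 ∨ y = x) with h | h; exacts [h3 y h, by simp [h, hx]])]
      simp [pvG, hx]

lemma pvSorted_buckets (bs : List (List String)) :
    PySem.List.sorted bs pvGetBlockPriority false
      = pvG 0 bs ++ (pvG 1 bs ++ (pvG 2 bs ++ pvG 3 bs)) := by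
  rw [PySem.List.sorted_eq_foldl_insertBy]
  simpa using pvFoldl_ins_buckets bs [] [] [] [] (by simp) (by simp) (by simp) (by simp)

lemma pvF_append_single (p : Nat) (bl : List (List String)) (cb : List String) :
    pvF p (bl ++ [cb]) = pvF p bl ++ (if pvGetBlockPriority cb = p then cb else []) := by
  simp only [pvF, pvG, List.filter_append, List.flatten_append]
  split_ifs with h <;> simp [h]

-- the two loops, run in lockstep: B's buckets are the flattened priority classes of A's blocks
lemma pvLoop_inv (rest : List String) :
    ∀ (bl : List (List String)) (cb : List String) (hcb : cb ≠ [])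
      (b0 b1 b2 b3 : List String) (cur : Nat)
      (hcur : cur = pvGetBlockPriority cb)
      (e0 : b0 = pvF 0 bl ++ (if cur = 0 then cb else []))
      (e1 : b1 = pvF 1 bl ++ (if cur = 1 then cb else []))
      (e2 : b2 = pvF 2 bl ++ (if cur = 2 then cb else []))
      (e3 : b3 = pvF 3 bl ++ (if cur = 3 then cb else [])),
    (rest.foldl pvStepA (bl, cb)).2 ≠ [] ∧
    (rest.foldl pvStepB ((b0, b1, b2, b3), cur)).2
        = pvGetBlockPriority (rest.foldl pvStepA (bl, cb)).2 ∧
    (rest.foldl pvStepB ((b0, b1, b2, b3), cur)).1.1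
        = pvF 0 (rest.foldl pvStepA (bl, cb)).1
          ++ (if (rest.foldl pvStepB ((b0, b1, b2, b3), cur)).2 = 0 then (rest.foldl pvStepA (bl, cb)).2 else []) ∧
    (rest.foldl pvStepB ((b0, b1, b2, b3), cur)).1.2.1
        = pvF 1 (rest.foldl pvStepA (bl, cb)).1
          ++ (if (rest.foldl pvStepB ((b0, b1, b2, b3), cur)).2 = 1 then (rest.foldl pvStepA (bl, cb)).2 else []) ∧
    (rest.foldl pvStepB ((b0, b1, b2, b3), cur)).1.2.2.1
        = pvF 2 (rest.foldl pvStepA (bl, cb)).1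
          ++ (if (rest.foldl pvStepB ((b0, b1, b2, b3), cur)).2 = 2 then (rest.foldl pvStepA (bl, cb)).2 else []) ∧
    (rest.foldl pvStepB ((b0, b1, b2, b3), cur)).1.2.2.2
        = pvF 3 (rest.foldl pvStepA (bl, cb)).1
          ++ (if (rest.foldl pvStepB ((b0, b1, b2, b3), cur)).2 = 3 then (rest.foldl pvStepA (bl, cb)).2 else []) := by
  induction rest with
  | nil =>
    intro bl cb hcb b0 b1 b2 b3 cur hcur e0 e1 e2 e3
    exact ⟨hcb, hcur, by simp [e0, hcur], by simp [e1, hcur], by simp [e2, hcur], by simp [e3, hcur]⟩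
  | cons line rest ih =>
    intro bl cb hcb b0 b1 b2 b3 cur hcur e0 e1 e2 e3
    have hne : cb.isEmpty = false := by simpa [List.isEmpty_iff] using hcb
    by_cases hs : PySem.Chars.startswith line.toList ['\n', '['] = true
    · have hA : pvStepA (bl, cb) line = (bl ++ [cb], [line]) := by
        simp [pvStepA, hs, hne]
      have hB : pvStepB ((b0, b1, b2, b3), cur) line
          = (pvAddTo (b0, b1, b2, b3) (pvLinePriority line) line, pvLinePriority line) := by
        simp [pvStepB, hs]
      have hFp : ∀ p, pvF p (bl ++ [cb]) = pvF p bl ++ (if cur = p then cb else []) := by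
        intro p; rw [pvF_append_single, hcur]
      have hp := pvPrio_cases [line]
      rw [pvPrioA_cons] at hp
      simp only [List.foldl_cons, hA, hB]
      rcases hp with hq | hq | hq | hq <;>
        exact ih (bl ++ [cb]) [line] (by simp) _ _ _ _ _ (by rw [pvPrioA_cons])
          (by simp [pvAddTo, hq, pvPrioA_cons, hFp 0, e0])
          (by simp [pvAddTo, hq, pvPrioA_cons, hFp 1, e1])
          (by simp [pvAddTo, hq, pvPrioA_cons, hFp 2, e2])
          (by simp [pvAddTo, hq, pvPrioA_cons, hFp 3, e3])
    · have hA : pvStepA (bl, cb) line = (bl, cb ++ [line]) := by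
        simp [pvStepA, hs]
      have hB : pvStepB ((b0, b1, b2, b3), cur) line
          = (pvAddTo (b0, b1, b2, b3) cur line, cur) := by
        simp [pvStepB, hs]
      rcases cb with _ | ⟨c, t⟩
      · exact absurd rfl hcb
      have hcur' : cur = pvGetBlockPriority ((c :: t) ++ [line]) := by
        rw [hcur]; rfl
      have hq := pvPrio_cases (c :: t)
      rw [← hcur] at hq
      simp only [List.foldl_cons, hA, hB]
      rcases hq with hq | hq | hq | hq <;>
        exact ih bl ((c :: t) ++ [line]) (by simp) _ _ _ _ _ hcur'
          (by simp [pvAddTo, hq, e0])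
          (by simp [pvAddTo, hq, e1])
          (by simp [pvAddTo, hq, e2])
          (by simp [pvAddTo, hq, e3])

-- ===== VERDICT (by name: the statement is the Claim_ definition above) =====
theorem sort_tasks_by_priority_py_spec : Claim_equal_sort_tasks_by_priority_py := by
  intro lines _
  unfold Spec_sort_tasks_by_priority_py
  rcases lines with _ | ⟨first, rest⟩
  · rfl
  · have h0 : pvStepA ([], []) first = ([], [first]) := by simp [pvStepA]
    have inv := pvLoop_inv rest [] [first] (by simp)
      (if pvLinePriority first = 0 then [first] else [])
      (if pvLinePriority first = 1 then [first] else [])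
      (if pvLinePriority first = 2 then [first] else [])
      (if pvLinePriority first = 3 then [first] else [])
      (pvLinePriority first) (by rw [pvPrioA_cons])
      (by simp [pvF, pvG]) (by simp [pvF, pvG]) (by simp [pvF, pvG]) (by simp [pvF, pvG])
    obtain ⟨hne, hcur, i0, i1, i2, i3⟩ := inv
    set stA := rest.foldl pvStepA ([], [first]) with hstA
    set stB := rest.foldl pvStepB
      ((if pvLinePriority first = 0 then [first] else [],
        if pvLinePriority first = 1 then [first] else [],
        if pvLinePriority first = 2 then [first] else [],
        if pvLinePriority first = 3 then [first] else []), pvLinePriority first) with hstB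
    have hAinit : (first :: rest).foldl pvStepA ([], []) = stA := by
      rw [List.foldl_cons, h0]
    have hBinit : rest.foldl pvStepB (pvAddTo ([], [], [], []) (pvLinePriority first) first,
        pvLinePriority first) = stB := by
      rcases pvPrio_cases [first] with hq | hq | hq | hq <;>
        rw [pvPrioA_cons] at hq <;> rw [hstB] <;> simp [pvAddTo, hq]
    have hAval : sort_tasks_by_priority_py (first :: rest)
        = pvF 0 (stA.1 ++ [stA.2]) ++ (pvF 1 (stA.1 ++ [stA.2])
          ++ (pvF 2 (stA.1 ++ [stA.2]) ++ pvF 3 (stA.1 ++ [stA.2]))) := by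
      show (if (first :: rest).isEmpty then (first :: rest) else _) = _
      simp only [List.isEmpty_cons, if_false, hAinit]
      have hne' : stA.2.isEmpty = false := by simpa [List.isEmpty_iff] using hne
      rw [hne', if_neg (by simp)]
      rw [pvSorted_buckets]
      rw [show (fun (result block : List String) => result ++ block)
            = (fun (acc : List String) (x : List String) => acc ++ id x) from rfl,
          PySem.List.foldl_append_eq_flatMap]
      simp [pvF, List.flatMap_id']
    have hBval : sort_tasks_by_priority_py_alt (first :: rest)
        = stB.1.1 ++ (stB.1.2.1 ++ (stB.1.2.2.1 ++ stB.1.2.2.2)) := by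
      show (let st := rest.foldl pvStepB (pvAddTo ([], [], [], []) (pvLinePriority first) first,
          pvLinePriority first); st.1.1 ++ st.1.2.1 ++ st.1.2.2.1 ++ st.1.2.2.2) = _
      rw [show (rest.foldl pvStepB (pvAddTo ([], [], [], []) (pvLinePriority first) first,
          pvLinePriority first)) = stB from hBinit]
      simp [List.append_assoc]
    rw [hAval, hBval, i0, i1, i2, i3, hcur,
        pvF_append_single 0 stA.1 stA.2, pvF_append_single 1 stA.1 stA.2,
        pvF_append_single 2 stA.1 stA.2, pvF_append_single 3 stA.1 stA.2]
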